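-- pv_equiv track=rewrite | github.com/HaifaCLG/Triggering | Code/relative_switching_plots.py | check_cs
-- ===== SOURCE A (Python) =====
-- AR = '0'
--
-- EN = '1'
--
-- def check_cs(langs):
--     cs = list()
--     prev = ''
--     for lang in langs:
--         if prev == EN and lang == AR:
--             cs.append(1)
--         elif prev == AR and lang == EN:
--             cs.append(2)
--         else:
--             cs.append(0)
--         if lang in [EN, AR]:
--             prev = lang
--     return cs
-- ===== SOURCE B (Python) =====
-- AR = '0'
--
-- EN = '1'
--
-- def check_cs(langs):
--     cs = [0] * len(langs)
--     marked = [(i, l) for i, l in enumerate(langs) if l in (EN, AR)]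
--     for (pi, pl), (ci, cl) in zip(marked, marked[1:]):
--         if pl == EN and cl == AR:
--             cs[ci] = 1
--         elif pl == AR and cl == EN:
--             cs[ci] = 2
--     return cs
-- ===== Notes on version B (the rewrite author's own statement) =====
-- stated objective: alternative
-- what changed: Replaces A's state-threaded single scan (carrying the last EN/AR language in a variable) by a gather-then-pairwise decomposition: collect all EN/AR positions once, then mark transitions between consecutive collected pairs into a preallocated zero list.
import Mathlib
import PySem

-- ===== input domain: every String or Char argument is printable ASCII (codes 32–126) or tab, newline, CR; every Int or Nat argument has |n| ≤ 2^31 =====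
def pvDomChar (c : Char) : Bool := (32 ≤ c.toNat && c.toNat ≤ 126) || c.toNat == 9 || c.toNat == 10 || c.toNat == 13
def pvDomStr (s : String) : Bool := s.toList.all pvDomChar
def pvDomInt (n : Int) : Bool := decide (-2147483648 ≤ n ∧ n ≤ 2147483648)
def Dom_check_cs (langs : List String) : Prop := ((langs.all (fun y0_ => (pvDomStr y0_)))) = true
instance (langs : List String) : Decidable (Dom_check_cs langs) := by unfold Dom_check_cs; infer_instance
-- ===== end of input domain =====

-- B replaces A's state-threaded single scan by a gather-then-pairwise-scan decomposition
-- (collect the EN/AR positions once, then mark transitions between consecutive ones): an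
-- alternative structure, same O(n) cost.

-- ===== PORT A =====
-- A's loop appends to cs and threads prev (updated only on EN='1'/AR='0'); ported as a
-- foldl over langs with state (cs, prev).
def check_cs (langs : List String) : List Int :=
  (langs.foldl
    (fun (st : List Int × String) lang =>
      (st.1 ++ [if st.2 == "1" && lang == "0" then (1 : Int)
                else if st.2 == "0" && lang == "1" then (2 : Int) else 0],
       if lang == "1" || lang == "0" then lang else st.2))
    ([], "")).1

-- ===== PORT B =====
-- Source B: cs = [0]*len(langs); marked = EN/AR positions from enumerate; for consecutive
-- pairs in marked, assign cs[ci]. Indices from enumerate are ≥ 0, so cs[ci] = ... is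
-- exactly List.set ci.toNat (always in range); marked[1:] is PySem.List.slice.
def check_cs_alt (langs : List String) : List Int :=
  let cs := List.replicate langs.length (0 : Int)
  let marked := (PySem.List.enumerate langs).filter (fun p => p.2 == "1" || p.2 == "0")
  (marked.zip (PySem.List.slice marked (some 1) none)).foldl
    (fun cs pq =>
      if pq.1.2 == "1" && pq.2.2 == "0" then cs.set pq.2.1.toNat 1
      else if pq.1.2 == "0" && pq.2.2 == "1" then cs.set pq.2.1.toNat 2
      else cs) cs

-- ===== PRECONDITION & SPEC =====
def Spec_check_cs (langs : List String) (out : List Int) : Prop := out = check_cs_alt langs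
instance (langs : List String) (out : List Int) : Decidable (Spec_check_cs langs out) := by unfold Spec_check_cs; infer_instance

-- ===== CLAIM (what is proved, stated in full; the proofs are below) =====
def Claim_equal_check_cs : Prop := ∀ (langs : List String), Dom_check_cs langs → Spec_check_cs langs (check_cs langs)

-- ===== LEMMAS AND PROOFS =====

-- Structural form of A's loop.
def goA : String → List String → List Int
  | _, [] => []
  | prev, lang :: rest =>
    (if prev == "1" && lang == "0" then (1 : Int)
     else if prev == "0" && lang == "1" then (2 : Int) else 0)
      :: goA (if lang == "1" || lang == "0" then lang else prev) rest

theorem foldlA_eq (xs : List String) (acc : List Int) (prev : String) :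
    (xs.foldl
      (fun (st : List Int × String) lang =>
        (st.1 ++ [if st.2 == "1" && lang == "0" then (1 : Int)
                  else if st.2 == "0" && lang == "1" then (2 : Int) else 0],
         if lang == "1" || lang == "0" then lang else st.2))
      (acc, prev)).1 = acc ++ goA prev xs := by
  induction xs generalizing acc prev with
  | nil => simp [goA]
  | cons x rest ih =>
    rw [List.foldl_cons, ih]
    simp [goA]

-- One update of B's fold.
def updB (pl : String) (q : Int × String) (cs : List Int) : List Int :=
  if pl == "1" && q.2 == "0" then cs.set q.1.toNat 1
  else if pl == "0" && q.2 == "1" then cs.set q.1.toNat 2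
  else cs

-- B's fold over consecutive pairs, as a recursion carrying the previous marked language.
def applyO : Option String → List (Int × String) → List Int → List Int
  | _, [], cs => cs
  | om, q :: M, cs =>
    applyO (some q.2) M (match om with | none => cs | some pl => updB pl q cs)

theorem zipfold_eq (M : List (Int × String)) (m : Int × String) (cs : List Int) :
    (((m :: M).zip M).foldl
      (fun cs pq =>
        if pq.1.2 == "1" && pq.2.2 == "0" then cs.set pq.2.1.toNat 1
        else if pq.1.2 == "0" && pq.2.2 == "1" then cs.set pq.2.1.toNat 2
        else cs) cs) = applyO (some m.2) M cs := by
  induction M generalizing m cs with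
  | nil => simp [applyO]
  | cons q M' ih =>
    rw [List.zip_cons_cons, List.foldl_cons, ih]
    simp [applyO, updB]

-- The marked list of xs, enumerated from start s.
def Em (xs : List String) (s : Int) : List (Int × String) :=
  (PySem.List.enumerate xs s).filter (fun p => p.2 == "1" || p.2 == "0")

theorem Em_cons (x : String) (xs : List String) (s : Int) :
    Em (x :: xs) s =
      if (x == "1" || x == "0") then (s, x) :: Em xs (s + 1) else Em xs (s + 1) := by
  simp [Em, PySem.List.enumerate_cons]
  split <;> simp_all

theorem set_append_len (l₁ l₂ : List Int) (v : Int) :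
    (l₁ ++ l₂).set l₁.length v = l₁ ++ l₂.set 0 v := by
  induction l₁ with
  | nil => rfl
  | cons a t ih => simp [ih]

theorem main_eq (xs : List String) (done : List Int) (om : Option String) :
    applyO om (Em xs (done.length : Int)) (done ++ List.replicate xs.length (0 : Int))
      = done ++ goA (match om with | none => "" | some pl => pl) xs := by
  induction xs generalizing done om with
  | nil => simp [Em, PySem.List.enumerate, applyO, goA]
  | cons x rest ih =>
    rw [Em_cons]
    by_cases hml : (x == "1" || x == "0") = true
    · rw [if_pos hml]
      -- split into the 0-entry for x and the rest
      have hrep : List.replicate (x :: rest).length (0 : Int)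
          = (0 : Int) :: List.replicate rest.length 0 := by simp [List.replicate]
      rw [hrep]
      cases om with
      | none =>
        show applyO (some x) (Em rest ((done.length : Int) + 1))
            (done ++ 0 :: List.replicate rest.length 0) = _
        have h1 : done ++ (0 : Int) :: List.replicate rest.length 0
            = (done ++ [0]) ++ List.replicate rest.length 0 := by simp
        have h2 : ((done.length : Int) + 1) = ((done ++ [(0 : Int)]).length : Int) := by
          simp
        rw [h1, h2, ih (done ++ [0]) (some x)]
        have hx : goA "" (x :: rest) = 0 :: goA x rest := by
          rcases Bool.or_eq_true_iff.mp hml with h | h <;>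
            simp_all [goA]
        simp [hx]
      | some pl =>
        show applyO (some x) (Em rest ((done.length : Int) + 1))
            (updB pl ((done.length : Int), x) (done ++ 0 :: List.replicate rest.length 0)) = _
        set v : Int := if pl == "1" && x == "0" then 1
          else if pl == "0" && x == "1" then 2 else 0 with hv
        have hupd : updB pl ((done.length : Int), x) (done ++ 0 :: List.replicate rest.length 0)
            = done ++ v :: List.replicate rest.length 0 := by
          have hset : ∀ w : Int, (done ++ (0 : Int) :: List.replicate rest.length 0).set
              ((done.length : Int)).toNat w = done ++ w :: List.replicate rest.length 0 := by
            intro w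
            have : ((done.length : Int)).toNat = done.length := by simp
            rw [this, set_append_len]
            rfl
          simp only [updB, hv]
          split_ifs with h1 h2 <;> simp_all
        rw [hupd]
        have h1 : done ++ v :: List.replicate rest.length 0
            = (done ++ [v]) ++ List.replicate rest.length 0 := by simp
        have h2 : ((done.length : Int) + 1) = ((done ++ [v]).length : Int) := by simp
        rw [h1, h2, ih (done ++ [v]) (some x)]
        have hx : goA pl (x :: rest) = v :: goA x rest := by
          rcases Bool.or_eq_true_iff.mp hml with h | h <;>
            simp_all [goA]
        simp [hx]
    · rw [if_neg hml]
      have hrep : List.replicate (x :: rest).length (0 : Int)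
          = (0 : Int) :: List.replicate rest.length 0 := by simp [List.replicate]
      rw [hrep]
      have h1 : done ++ (0 : Int) :: List.replicate rest.length 0
          = (done ++ [0]) ++ List.replicate rest.length 0 := by simp
      have h2 : ((done.length : Int) + 1) = ((done ++ [(0 : Int)]).length : Int) := by simp
      rw [h1, h2, ih (done ++ [0]) om]
      have hx1 : (x == "1") = false := by
        cases h : (x == "1") <;> simp_all
      have hx0 : (x == "0") = false := by
        cases h : (x == "0") <;> simp_all
      have hx : ∀ prev, goA prev (x :: rest) = 0 :: goA prev rest := by
        intro prev; simp [goA, hx1, hx0]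
      cases om <;> simp [hx]

theorem alt_eq_applyO (langs : List String) :
    check_cs_alt langs
      = applyO none (Em langs 0) (List.replicate langs.length (0 : Int)) := by
  show (((PySem.List.enumerate langs).filter (fun p => p.2 == "1" || p.2 == "0")).zip
      (PySem.List.slice ((PySem.List.enumerate langs).filter (fun p => p.2 == "1" || p.2 == "0"))
        (some 1) none)).foldl
      (fun cs pq =>
        if pq.1.2 == "1" && pq.2.2 == "0" then cs.set pq.2.1.toNat 1
        else if pq.1.2 == "0" && pq.2.2 == "1" then cs.set pq.2.1.toNat 2
        else cs) (List.replicate langs.length (0 : Int)) = _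
  rw [PySem.List.slice_from_one]
  show ((Em langs 0).zip (Em langs 0).tail).foldl _ _ = _
  cases hM : Em langs 0 with
  | nil => simp [applyO]
  | cons m M => rw [List.tail_cons, zipfold_eq]; rfl

-- ===== VERDICT (by name: the statement is the Claim_ definition above) =====
theorem check_cs_spec : Claim_equal_check_cs := by
  intro langs _
  show check_cs langs = check_cs_alt langs
  unfold check_cs
  rw [foldlA_eq, List.nil_append, alt_eq_applyO]
  have := main_eq langs [] none
  simpa using this.symm
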